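-- pv_equiv track=rewrite | github.com/marvel2950/Data-Structures-and-Algorithms-Problems | Level 2/Hashing/Relative Sorting (optimised).py | sortRelative
-- ===== SOURCE A (Python) =====
-- from collections import Counter
--
-- def sortRelative(arr1,arr2):
--     res = []
--     f = Counter(arr1)
--
--     for i in arr2:
--         res.extend([i]*f[i])
--         f[i] = 0
--     rem = list(sorted((filter(lambda x:f[x] != 0,f.keys()))))
--     for i in rem:
--         res.extend([i]*f[i])
--     return res
--
-- arr1 = [2,1,2,5,7,1,9,3,6,8,8]
--
-- arr2 = [2,1,8,3]
--
-- res = sortRelative(arr1,arr2)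
-- ===== SOURCE B (Python) =====
-- def sortRelative(arr1, arr2):
--     rank = {}
--     for v in arr2:
--         if v not in rank:
--             rank[v] = len(rank)
--     n = len(arr2)
--     return sorted(arr1, key=lambda x: (rank.get(x, n), x))
-- ===== Notes on version B (the rewrite author's own statement) =====
-- stated objective: idiomatic
-- what changed: Replaces the Counter-and-bucket-extend construction with a single stable comparison sort of arr1 under the composite key (first-occurrence rank in arr2, value itself).
import Mathlib
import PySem

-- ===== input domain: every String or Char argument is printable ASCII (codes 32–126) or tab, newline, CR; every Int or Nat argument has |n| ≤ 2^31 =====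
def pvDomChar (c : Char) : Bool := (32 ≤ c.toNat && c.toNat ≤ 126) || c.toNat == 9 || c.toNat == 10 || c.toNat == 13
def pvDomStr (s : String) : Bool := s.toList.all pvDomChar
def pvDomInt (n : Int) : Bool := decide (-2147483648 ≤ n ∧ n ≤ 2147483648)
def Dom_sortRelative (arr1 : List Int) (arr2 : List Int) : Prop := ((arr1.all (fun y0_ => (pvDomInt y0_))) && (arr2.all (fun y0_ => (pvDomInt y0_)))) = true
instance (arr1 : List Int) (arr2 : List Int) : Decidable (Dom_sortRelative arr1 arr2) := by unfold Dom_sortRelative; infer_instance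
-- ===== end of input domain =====

-- B replaces A's Counter-and-bucket-extend construction by one stable sort of arr1
-- under the composite key (first-occurrence rank in arr2, value); same return value.

-- ===== PORT A =====
def sortRelative (arr1 : List Int) (arr2 : List Int) : List Int :=
  -- res = []; f = Counter(arr1)
  -- for i in arr2: res.extend([i]*f[i]); f[i] = 0
  let st := arr2.foldl
      (fun (st : List Int × PySem.Dict Int Int) i =>
        (st.1 ++ PySem.List.pyRepeat [i] (st.2.getD i 0), st.2.insert i 0))
      ([], PySem.Dict.counter arr1)
  -- rem = list(sorted(filter(lambda x: f[x] != 0, f.keys())))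
  let rem := PySem.List.sorted
      ((st.2.keys).filter (fun x => st.2.getD x 0 != 0)) (fun x => x) false
  -- for i in rem: res.extend([i]*f[i])
  rem.foldl (fun acc i => acc ++ PySem.List.pyRepeat [i] (st.2.getD i 0)) st.1

-- ===== PORT B =====
def sortRelative_alt (arr1 : List Int) (arr2 : List Int) : List Int :=
  -- rank = {}; for v in arr2: if v not in rank: rank[v] = len(rank)
  let rank := arr2.foldl
      (fun (d : PySem.Dict Int Int) v =>
        if d.contains v then d else d.insert v (d.size : Int))
      PySem.Dict.empty
  -- return sorted(arr1, key=lambda x: (rank.get(x, n), x))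
  PySem.List.sorted2 arr1 (fun x => rank.getD x (arr2.length : Int)) (fun x => x) false

-- ===== PRECONDITION & SPEC =====
def Spec_sortRelative (arr1 : List Int) (arr2 : List Int) (out : List Int) : Prop := out = sortRelative_alt arr1 arr2
instance (arr1 : List Int) (arr2 : List Int) (out : List Int) : Decidable (Spec_sortRelative arr1 arr2 out) := by unfold Spec_sortRelative; infer_instance

-- ===== CLAIM (what is proved, stated in full; the proofs are below) =====
def Claim_equal_sortRelative : Prop := ∀ (arr1 : List Int) (arr2 : List Int), Dom_sortRelative arr1 arr2 → Spec_sortRelative arr1 arr2 (sortRelative arr1 arr2)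

-- ===== LEMMAS AND PROOFS =====

-- the multiplicity block contributed by value i
def pvG (arr1 : List Int) (i : Int) : List Int := List.replicate (arr1.count i) i

-- B's sort key, first component: first-occurrence rank in arr2 (= len(arr2) if absent)
def pvRank (arr2 : List Int) (x : Int) : Int :=
  if x ∈ arr2 then ((PySem.List.dedup arr2).idxOf x : Int) else (arr2.length : Int)

def pvKey (arr2 : List Int) (x : Int) : Lex (Int × Int) := toLex (pvRank arr2 x, x)

-- shape of A's first loop output: a block per not-yet-seen value of arr2, in order
def pvBuild (arr1 : List Int) (S : List Int) : List Int → List Int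
  | [] => []
  | i :: t => (if i ∈ S then [] else pvG arr1 i) ++ pvBuild arr1 (i :: S) t

-- A's leftover block list: distinct elements of arr1 not in arr2, ascending
def pvRem (arr1 : List Int) (arr2 : List Int) : List Int :=
  PySem.List.sorted ((PySem.Set.ofList arr1).filter (fun x => !decide (x ∈ arr2))) (fun x => x) false

def pvOut (arr1 : List Int) (arr2 : List Int) : List Int :=
  pvBuild arr1 [] arr2 ++ (pvRem arr1 arr2).flatMap (pvG arr1)

-- ---- B side: characterisation of the rank dict ----
lemma rank_loop (l : List Int) (p : List Int) (d : PySem.Dict Int Int)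
    (hg : ∀ v, d.get? v = if v ∈ p then some ((PySem.List.dedup p).idxOf v : Int) else none)
    (hs : d.size = (PySem.List.dedup p).length) :
    (∀ v, (l.foldl (fun (d : PySem.Dict Int Int) v =>
        if d.contains v then d else d.insert v (d.size : Int)) d).get? v =
      if v ∈ p ++ l then some ((PySem.List.dedup (p ++ l)).idxOf v : Int) else none) ∧
    (l.foldl (fun (d : PySem.Dict Int Int) v =>
        if d.contains v then d else d.insert v (d.size : Int)) d).size =
      (PySem.List.dedup (p ++ l)).length := by
  induction l generalizing p d with
  | nil =>
    refine ⟨?_, by simpa using hs⟩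
    intro v; simpa using hg v
  | cons i t ih =>
    simp only [List.foldl_cons]
    have hded : PySem.List.dedup (p ++ [i]) =
        if (PySem.Set.ofList p).contains i then PySem.List.dedup p
        else PySem.List.dedup p ++ [i] := by
      rw [PySem.List.dedup_eq_ofList, PySem.Set.ofList_append_singleton,
        PySem.List.dedup_eq_ofList]
      rfl
    have happ : p ++ i :: t = (p ++ [i]) ++ t := by simp
    rw [happ]
    by_cases hip : i ∈ p
    · -- i already seen: dict unchanged
      have hci : d.contains i = true := by
        have h1 : d.get? i ≠ none := by rw [hg i]; simp [hip]
        have h2 : i ∈ d.keys := by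
          by_contra hk
          exact h1 ((PySem.Dict.get?_eq_none_iff_not_mem_keys d i).mpr hk)
        exact (PySem.Dict.contains_iff_mem_keys d i).mpr h2
      rw [if_pos hci]
      have hded' : PySem.List.dedup (p ++ [i]) = PySem.List.dedup p := by
        rw [hded]; simp [PySem.Set.contains, PySem.Set.mem_ofList, hip]
      apply ih (p ++ [i]) d
      · intro v
        rw [hg v, hded']
        by_cases hv : v ∈ p
        · simp [hv]
        · have : v ≠ i := fun h => hv (h ▸ hip)
          simp [hv, this]
      · rw [hded']; exact hs
    · -- fresh value: insert with rank = current size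
      have hci : d.contains i = false := by
        have h1 : d.get? i = none := by rw [hg i]; simp [hip]
        have h2 : i ∉ d.keys := (PySem.Dict.get?_eq_none_iff_not_mem_keys d i).mp h1
        rw [PySem.Dict.contains_eq_decide_mem_keys]
        simp [h2]
      rw [if_neg (by simp [hci])]
      have hind : i ∉ PySem.List.dedup p := by
        simpa [PySem.List.mem_dedup] using hip
      have hded' : PySem.List.dedup (p ++ [i]) = PySem.List.dedup p ++ [i] := by
        rw [hded]; simp [PySem.Set.contains, PySem.Set.mem_ofList, hip]
      apply ih (p ++ [i]) (d.insert i (d.size : Int))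
      · intro v
        by_cases hvi : v = i
        · subst hvi
          rw [PySem.Dict.get?_insert_self, hded']
          have hidx : List.idxOf v (PySem.List.dedup p ++ [v]) = (PySem.List.dedup p).length := by
            rw [List.idxOf_append, if_neg hind]
            simp
          rw [if_pos (by simp), hidx, hs]
        · rw [PySem.Dict.get?_insert_of_ne _ _ hvi, hg v, hded']
          by_cases hv : v ∈ p
          · have hvd : v ∈ PySem.List.dedup p := (PySem.List.mem_dedup p v).mpr hv
            rw [List.idxOf_append, if_pos hvd]
            simp [hv]
          · simp [hv, hvi]
      · rw [hded', PySem.Dict.size_insert, if_neg (by simp [hci]), hs]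
        simp

lemma rank_final (arr2 : List Int) (x dflt : Int) :
    (arr2.foldl (fun (d : PySem.Dict Int Int) v =>
        if d.contains v then d else d.insert v (d.size : Int)) PySem.Dict.empty).getD x dflt =
      if x ∈ arr2 then ((PySem.List.dedup arr2).idxOf x : Int) else dflt := by
  have h := (rank_loop arr2 [] PySem.Dict.empty
    (by intro v; simp [PySem.Dict.get?_empty]) (by simp [PySem.List.dedup])).1 x
  simp only [List.nil_append] at h
  unfold PySem.Dict.getD
  rw [h]
  by_cases hx : x ∈ arr2 <;> simp [hx]

lemma alt_eq_sorted (arr1 arr2 : List Int) :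
    sortRelative_alt arr1 arr2 = PySem.List.sorted arr1 (pvKey arr2) false := by
  have hk : ∀ x : Int,
      ((arr2.foldl (fun (d : PySem.Dict Int Int) v =>
          if d.contains v then d else d.insert v (d.size : Int))
         PySem.Dict.empty).getD x (arr2.length : Int)) = pvRank arr2 x := by
    intro x
    rw [rank_final]
    unfold pvRank
    rfl
  unfold sortRelative_alt PySem.List.sorted2
  rw [PySem.List.sorted_eq_foldl_insertBy]
  dsimp only
  simp only [hk]
  apply PySem.List.foldl_congr_mem
  intro acc x _
  congr 1
  funext a b
  by_cases h1 : pvRank arr2 a < pvRank arr2 b <;>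
    by_cases h2 : pvRank arr2 b < pvRank arr2 a <;>
      by_cases h3 : a < b <;>
        simp [pvKey, Prod.Lex.lt_iff, h1, h2, h3] <;> omega

-- ---- A side ----
lemma A_loop (arr1 : List Int) (l : List Int) (res : List Int) (S : List Int)
    (f : PySem.Dict Int Int)
    (hg : ∀ v, f.getD v 0 = if v ∈ S then 0 else (arr1.count v : Int))
    : ((l.foldl (fun (st : List Int × PySem.Dict Int Int) i =>
          (st.1 ++ PySem.List.pyRepeat [i] (st.2.getD i 0), st.2.insert i 0)) (res, f)).1
        = res ++ pvBuild arr1 S l)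
    ∧ (∀ v, (l.foldl (fun (st : List Int × PySem.Dict Int Int) i =>
          (st.1 ++ PySem.List.pyRepeat [i] (st.2.getD i 0), st.2.insert i 0)) (res, f)).2.getD v 0
        = if v ∈ S ∨ v ∈ l then 0 else (arr1.count v : Int))
    ∧ (l.foldl (fun (st : List Int × PySem.Dict Int Int) i =>
          (st.1 ++ PySem.List.pyRepeat [i] (st.2.getD i 0), st.2.insert i 0)) (res, f)).2.keys
        = PySem.Set.update f.keys l := by
  induction l generalizing res S f with
  | nil =>
    refine ⟨by simp [pvBuild], ?_, by simp [PySem.Set.update_nil]⟩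
    intro v; simp only [List.foldl_nil]; rw [hg v]; simp
  | cons i t ih =>
    simp only [List.foldl_cons]
    have hg' : ∀ v, (f.insert i 0).getD v 0 = if v ∈ i :: S then 0 else (arr1.count v : Int) := by
      intro v
      by_cases hvi : v = i
      · subst hvi; simp [PySem.Dict.getD_insert_self]
      · rw [PySem.Dict.getD_insert_of_ne _ _ _ hvi, hg v]; simp [hvi]
    obtain ⟨ih1, ih2, ih3⟩ :=
      ih (res ++ PySem.List.pyRepeat [i] (f.getD i 0)) (i :: S) (f.insert i 0) hg'
    refine ⟨?_, ?_, ?_⟩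
    · rw [ih1, hg i]
      show _ = res ++ ((if i ∈ S then [] else pvG arr1 i) ++ pvBuild arr1 (i :: S) t)
      by_cases hi : i ∈ S
      · simp [hi, PySem.List.pyRepeat_singleton]
      · simp [hi, PySem.List.pyRepeat_singleton, pvG]
    · intro v
      rw [ih2 v]
      by_cases hvS : v ∈ S <;> by_cases hvt : v ∈ t <;> by_cases hvi : v = i <;>
        simp [hvS, hvt, hvi]
    · rw [ih3, PySem.Set.update_cons]
      congr 1
      unfold PySem.Set.add PySem.Set.contains
      by_cases hc : f.contains i = true
      · rw [PySem.Dict.keys_insert_of_contains _ _ hc]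
        have : i ∈ f.keys := (PySem.Dict.contains_iff_mem_keys f i).mp hc
        simp [this]
      · rw [PySem.Dict.keys_insert_of_not_contains _ _ (by simpa using hc)]
        have : i ∉ f.keys := fun hm => hc ((PySem.Dict.contains_iff_mem_keys f i).mpr hm)
        simp [this]

lemma filter_update_false (q : Int → Bool) (l : List Int) (s : List Int)
    (h : ∀ x ∈ l, q x = false) :
    (PySem.Set.update s l).filter q = s.filter q := by
  induction l generalizing s with
  | nil => simp [PySem.Set.update]
  | cons i t ih =>
    rw [PySem.Set.update_cons, ih _ (fun x hx => h x (List.mem_cons_of_mem _ hx))]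
    unfold PySem.Set.add
    split
    · rfl
    · simp [List.filter_append, h i (List.mem_cons_self)]

lemma A_eq_pvOut (arr1 arr2 : List Int) : sortRelative arr1 arr2 = pvOut arr1 arr2 := by
  have hg0 : ∀ v, (PySem.Dict.counter arr1).getD v 0 =
      if v ∈ ([] : List Int) then 0 else (arr1.count v : Int) := by
    intro v; simp [PySem.Dict.getD_counter]
  obtain ⟨h1, h2, h3⟩ := A_loop arr1 arr2 [] [] (PySem.Dict.counter arr1) hg0
  rw [PySem.Dict.keys_counter] at h3
  unfold sortRelative
  dsimp only
  rw [h1, h3]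
  rw [filter_update_false _ arr2 _ (by intro x hx; rw [h2 x]; simp [hx])]
  have hfilter : (PySem.Set.ofList arr1).filter
        (fun x => (arr2.foldl (fun (st : List Int × PySem.Dict Int Int) i =>
          (st.1 ++ PySem.List.pyRepeat [i] (st.2.getD i 0), st.2.insert i 0))
          ([], PySem.Dict.counter arr1)).2.getD x 0 != 0) =
      (PySem.Set.ofList arr1).filter (fun x => !decide (x ∈ arr2)) := by
    apply List.filter_congr
    intro x hx
    have hx1 : x ∈ arr1 := (PySem.Set.mem_ofList arr1 x).mp hx
    rw [h2 x]
    by_cases hx2 : x ∈ arr2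
    · simp [hx2]
    · have : arr1.count x ≠ 0 := by
        have h2p : 0 < arr1.count x := List.count_pos_iff.mpr hx1
        omega
      simp [hx2, this]
  rw [hfilter, PySem.List.foldl_append_eq_flatMap]
  unfold pvOut pvRem
  congr 1
  apply List.flatMap_congr
  intro i hi
  rw [PySem.List.mem_sorted, List.mem_filter] at hi
  have hi2 : i ∉ arr2 := by simpa using hi.2
  rw [h2 i]
  simp [hi2, PySem.List.pyRepeat_singleton, pvG]

lemma build_eq (arr1 : List Int) (l S : List Int) :
    pvBuild arr1 S l =
      ((PySem.List.dedup l).filter (fun x => !decide (x ∈ S))).flatMap (pvG arr1) := by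
  induction l generalizing S with
  | nil => simp [pvBuild, PySem.List.dedup]
  | cons i t ih =>
    have hdt : ((PySem.Set.ofList t).discard i).filter (fun x => !decide (x ∈ S)) =
        (PySem.List.dedup t).filter (fun x => !decide (x ∈ i :: S)) := by
      rw [PySem.List.dedup_eq_ofList]
      unfold PySem.Set.discard
      rw [List.filter_filter]
      apply List.filter_congr
      intro x _
      by_cases hxi : x = i <;> simp [hxi]
    rw [show pvBuild arr1 S (i :: t) =
        (if i ∈ S then [] else pvG arr1 i) ++ pvBuild arr1 (i :: S) t from rfl,
      ih, PySem.List.dedup_eq_ofList (i :: t), PySem.Set.ofList_cons]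
    rw [List.filter_cons]
    by_cases hi : i ∈ S
    · simp [hi, hdt, PySem.List.dedup_eq_ofList]
    · simp [hi, hdt, PySem.List.dedup_eq_ofList]

-- ---- pvOut is a permutation of arr1 ----
lemma flatMap_count (arr1 : List Int) (bs : List Int) (hn : bs.Nodup) (v : Int) :
    (bs.flatMap (pvG arr1)).count v = if v ∈ bs then arr1.count v else 0 := by
  induction bs with
  | nil => simp
  | cons i t ih =>
    simp only [List.flatMap_cons, List.count_append, List.nodup_cons] at *
    rw [ih hn.2]
    unfold pvG
    by_cases hvi : v = i
    · subst hvi; simp [hn.1]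
    · simp [List.count_replicate, Ne.symm hvi, hvi]

lemma out_perm (arr1 arr2 : List Int) : (pvOut arr1 arr2).Perm arr1 := by
  rw [List.perm_iff_count]
  intro v
  have h1 : pvBuild arr1 [] arr2 = (PySem.List.dedup arr2).flatMap (pvG arr1) := by
    rw [build_eq]; simp
  have hnr : (pvRem arr1 arr2).Nodup :=
    ((PySem.List.sorted_perm _ _ _).nodup_iff).mpr
      (List.Nodup.filter _ (PySem.Set.nodup_ofList arr1))
  have hmem : ∀ x, x ∈ pvRem arr1 arr2 ↔ (x ∈ arr1 ∧ x ∉ arr2) := by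
    intro x
    unfold pvRem
    rw [PySem.List.mem_sorted, List.mem_filter, PySem.Set.mem_ofList]
    simp
  unfold pvOut
  rw [List.count_append, h1, flatMap_count _ _ (PySem.List.nodup_dedup arr2) v,
      flatMap_count _ _ hnr v]
  by_cases h2 : v ∈ arr2
  · simp [h2, hmem]
  · by_cases h1v : v ∈ arr1
    · simp [h2, hmem, h1v]
    · simp [h2, hmem, h1v, List.count_eq_zero_of_not_mem h1v]

-- ---- pvOut is ordered by pvKey ----
lemma flatMap_pairwise (arr1 : List Int) (bs : List Int) (P : Int → Int → Prop)
    (hrefl : ∀ x ∈ bs, P x x) (hp : bs.Pairwise P) :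
    (bs.flatMap (pvG arr1)).Pairwise P := by
  induction bs with
  | nil => simp
  | cons i t ih =>
    simp only [List.flatMap_cons] at *
    rw [List.pairwise_append]
    rw [List.pairwise_cons] at hp
    refine ⟨?_, ih (fun x hx => hrefl x (List.mem_cons_of_mem _ hx)) hp.2, ?_⟩
    · exact List.pairwise_replicate.mpr (Or.inr (hrefl i List.mem_cons_self))
    · intro a ha b hb
      obtain ⟨y, hy, hby⟩ := List.mem_flatMap.mp hb
      have hai : a = i := (List.eq_of_mem_replicate ha)
      have hbey : b = y := (List.eq_of_mem_replicate hby)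
      subst hai; subst hbey
      exact hp.1 _ hy

lemma out_pairwise (arr1 arr2 : List Int) :
    (pvOut arr1 arr2).Pairwise (fun a b => pvKey arr2 a ≤ pvKey arr2 b) := by
  have hlt : ∀ a b : Int, pvRank arr2 a < pvRank arr2 b → pvKey arr2 a ≤ pvKey arr2 b := by
    intro a b h
    exact le_of_lt (Prod.Lex.lt_iff.mpr (Or.inl h))
  have heq : ∀ a b : Int, pvRank arr2 a = pvRank arr2 b → a ≤ b → pvKey arr2 a ≤ pvKey arr2 b := by
    intro a b h1 h2
    exact Prod.Lex.le_iff.mpr (Or.inr ⟨h1, h2⟩)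
  have h1 : pvBuild arr1 [] arr2 = (PySem.List.dedup arr2).flatMap (pvG arr1) := by
    rw [build_eq]; simp
  have hranklt : ∀ a ∈ PySem.List.dedup arr2, ∀ b ∈ pvRem arr1 arr2,
      pvRank arr2 a < pvRank arr2 b := by
    intro a ha b hb
    have ha2 : a ∈ arr2 := (PySem.List.mem_dedup arr2 a).mp ha
    have hb2 : b ∉ arr2 := by
      unfold pvRem at hb
      rw [PySem.List.mem_sorted, List.mem_filter] at hb
      simpa using hb.2
    unfold pvRank
    rw [if_pos ha2, if_neg hb2]
    have hidx : (PySem.List.dedup arr2).idxOf a < (PySem.List.dedup arr2).length :=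
      List.idxOf_lt_length_of_mem ha
    have hlen : (PySem.List.dedup arr2).length ≤ arr2.length := by
      rw [PySem.List.dedup_eq_ofList]
      exact PySem.Set.length_ofList_le arr2
    exact_mod_cast lt_of_lt_of_le hidx hlen
  unfold pvOut
  rw [h1, ← List.flatMap_append]
  apply flatMap_pairwise
  · intro x _; exact le_refl _
  · rw [List.pairwise_append]
    refine ⟨?_, ?_, ?_⟩
    · -- blocks from arr2, ordered by first-occurrence index
      rw [List.pairwise_iff_getElem]
      intro i j hi hj hij
      apply hlt
      have hd := PySem.List.nodup_dedup arr2
      have hmi : (PySem.List.dedup arr2)[i] ∈ arr2 :=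
        (PySem.List.mem_dedup arr2 _).mp (List.getElem_mem hi)
      have hmj : (PySem.List.dedup arr2)[j] ∈ arr2 :=
        (PySem.List.mem_dedup arr2 _).mp (List.getElem_mem hj)
      unfold pvRank
      rw [if_pos hmi, if_pos hmj, List.Nodup.idxOf_getElem hd i hi,
        List.Nodup.idxOf_getElem hd j hj]
      exact_mod_cast hij
    · -- leftover values, ascending, all of rank len(arr2)
      have hp := PySem.List.sorted_pairwise
        ((PySem.Set.ofList arr1).filter (fun x => !decide (x ∈ arr2))) (fun x => x)
      refine List.Pairwise.imp_of_mem ?_ hp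
      intro a b ha hb hab
      unfold pvRem at ha hb
      rw [PySem.List.mem_sorted, List.mem_filter] at ha hb
      have ha2 : a ∉ arr2 := by simpa using ha.2
      have hb2 : b ∉ arr2 := by simpa using hb.2
      apply heq
      · unfold pvRank; rw [if_neg ha2, if_neg hb2]
      · exact hab
    · intro a ha b hb
      exact hlt a b (hranklt a ha b hb)

lemma key_injective (arr2 : List Int) : Function.Injective (pvKey arr2) := by
  intro a b h
  simpa using congrArg (fun z => (ofLex z).2) h

-- ===== VERDICT (by name: the statement is the Claim_ definition above) =====
theorem sortRelative_spec : Claim_equal_sortRelative := by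
  intro arr1 arr2 _
  unfold Spec_sortRelative
  rw [alt_eq_sorted, A_eq_pvOut]
  exact (PySem.List.eq_of_perm_of_pairwise_le_of_injective (pvKey arr2) (key_injective arr2)
    ((out_perm arr1 arr2).trans (PySem.List.sorted_perm arr1 (pvKey arr2) false).symm)
    (out_pairwise arr1 arr2) (PySem.List.sorted_pairwise arr1 (pvKey arr2)))
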